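-- pv_equiv track=rewrite | github.com/NestorMorales271/IA_P3 | Practica_2/Ordenamiento_Interno/5.DistrInitRun.py | distribution_initial_run
-- ===== SOURCE A (Python) =====
-- def distribution_initial_run(arr):
--     """
--     Implementa el algoritmo Distribution Initial Run para ordenar un arreglo.
--     Devuelve el arreglo ordenado.
--     """
--     # Sección 1: Identificación de runs iniciales
--     runs = []
--     n = len(arr)
--     i = 0
--     while i < n:
--         run = [arr[i]]
--         i += 1
--         while i < n and arr[i] >= arr[i-1]:
--             run.append(arr[i])
--             i += 1
--         runs.append(run)
--
--     # Sección 2: Mezcla de runs hasta obtener un solo run ordenado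
--     while len(runs) > 1:
--         new_runs = []
--         for j in range(0, len(runs), 2):
--             if j+1 < len(runs):
--                 # Mezcla dos runs adyacentes
--                 merged = merge(runs[j], runs[j+1])
--                 new_runs.append(merged)
--             else:
--                 # Si hay un run sin pareja, lo agregamos tal cual
--                 new_runs.append(runs[j])
--         runs = new_runs
--
--     # Sección 3: Retorno del resultado ordenado
--     return runs[0] if runs else []
--
-- def merge(left, right):
--     """
--     Mezcla dos listas ordenadas en una sola lista ordenada.
--     """
--     result = []
--     i = j = 0
--     while i < len(left) and j < len(right):
--         if left[i] <= right[j]: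
--             result.append(left[i])
--             i += 1
--         else:
--             result.append(right[j])
--             j += 1
--     result.extend(left[i:])
--     result.extend(right[j:])
--     return result
-- ===== SOURCE B (Python) =====
-- def distribution_initial_run(arr):
--     """Top-down recursive merge sort; same return value as A."""
--     n = len(arr)
--     if n <= 1:
--         return list(arr)
--     mid = n // 2
--     left = distribution_initial_run(arr[:mid])
--     right = distribution_initial_run(arr[mid:])
--     result = []
--     i = j = 0
--     while i < len(left) and j < len(right):
--         if left[i] <= right[j]:
--             result.append(left[i]); i += 1
--         else:
--             result.append(right[j]); j += 1
--     result.extend(left[i:])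
--     result.extend(right[j:])
--     return result
-- ===== Notes on version B (the rewrite author's own statement) =====
-- stated objective: simpler
-- what changed: Replaced A's natural-run detection plus bottom-up pairwise run merging with a plain top-down recursive merge sort (split at the midpoint, recurse, merge).
import Mathlib
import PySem

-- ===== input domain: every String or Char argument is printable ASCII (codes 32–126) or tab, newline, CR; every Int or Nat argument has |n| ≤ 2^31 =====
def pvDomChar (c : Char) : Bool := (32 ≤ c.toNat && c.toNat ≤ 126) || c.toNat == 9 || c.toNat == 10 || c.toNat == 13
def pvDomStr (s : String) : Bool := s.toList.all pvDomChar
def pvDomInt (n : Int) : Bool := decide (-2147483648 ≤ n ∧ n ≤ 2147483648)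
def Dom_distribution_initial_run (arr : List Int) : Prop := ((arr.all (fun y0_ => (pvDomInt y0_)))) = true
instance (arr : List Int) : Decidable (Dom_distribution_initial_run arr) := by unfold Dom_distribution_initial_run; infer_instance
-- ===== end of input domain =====

-- B replaces A's natural-run detection + bottom-up pairwise run merging with a plain
-- top-down recursive merge sort (simpler decomposition, same O(n log n) cost).

-- ===== PORT A =====

-- helper `merge` of A: two-pointer merge of two sorted lists
def pyMerge : List Int → List Int → List Int
  | [], right => right
  | left, [] => left
  | x :: xs, y :: ys =>
    if x ≤ y then x :: pyMerge xs (y :: ys) else y :: pyMerge (x :: xs) ys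

-- Section 1 inner while loop: consume elements while arr[i] >= arr[i-1]
def takeRun (prev : Int) : List Int → List Int × List Int
  | [] => ([], [])
  | y :: ys =>
    if prev ≤ y then
      ((takeRun y ys).1.cons y, (takeRun y ys).2)
    else ([], y :: ys)

theorem takeRun_snd_length (prev : Int) (l : List Int) :
    (takeRun prev l).2.length ≤ l.length := by
  induction l generalizing prev with
  | nil => simp [takeRun]
  | cons y ys ih =>
    simp only [takeRun]
    split
    · exact Nat.le_succ_of_le (ih y)
    · simp

-- Section 1 outer while loop: split arr into its maximal nondecreasing runs
def initRuns : List Int → List (List Int)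
  | [] => []
  | x :: xs =>
    (x :: (takeRun x xs).1) :: initRuns (takeRun x xs).2
termination_by l => l.length
decreasing_by exact Nat.lt_succ_of_le (takeRun_snd_length x xs)

-- Section 2 for-loop body: merge adjacent pairs of runs
def mergePass : List (List Int) → List (List Int)
  | [] => []
  | [r] => [r]
  | a :: b :: rest => pyMerge a b :: mergePass rest

theorem mergePass_length_le (rs : List (List Int)) :
    (mergePass rs).length ≤ rs.length := by
  induction rs using mergePass.induct with
  | case1 => simp [mergePass]
  | case2 => simp [mergePass]
  | case3 a b rest ih => simp only [mergePass, List.length_cons]; omega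

-- Section 2 while loop
def mergeLoop (rs : List (List Int)) : List (List Int) :=
  if h : 1 < rs.length then mergeLoop (mergePass rs) else rs
termination_by rs.length
decreasing_by
  match rs, h with
  | a :: b :: rest, _ =>
    have := mergePass_length_le rest
    simp only [mergePass, List.length_cons]
    omega

def distribution_initial_run (arr : List Int) : List Int :=
  match mergeLoop (initRuns arr) with
  | [] => []
  | r :: _ => r

-- ===== PORT B =====

-- B's two-pointer merge loop
def altMerge : List Int → List Int → List Int
  | [], right => right
  | left, [] => left
  | x :: xs, y :: ys =>
    if x ≤ y then x :: altMerge xs (y :: ys) else y :: altMerge (x :: xs) ys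

def distribution_initial_run_alt (arr : List Int) : List Int :=
  if arr.length ≤ 1 then arr
  else
    altMerge (distribution_initial_run_alt (arr.take (arr.length / 2)))
             (distribution_initial_run_alt (arr.drop (arr.length / 2)))
termination_by arr.length
decreasing_by
  · simp only [List.length_take]; omega
  · simp only [List.length_drop]; omega

-- ===== PRECONDITION & SPEC =====
def Spec_distribution_initial_run (arr : List Int) (out : List Int) : Prop := out = distribution_initial_run_alt arr
instance (arr : List Int) (out : List Int) : Decidable (Spec_distribution_initial_run arr out) := by unfold Spec_distribution_initial_run; infer_instance

-- ===== CLAIM (what is proved, stated in full; the proofs are below) =====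
def Claim_equal_distribution_initial_run : Prop := ∀ (arr : List Int), Dom_distribution_initial_run arr → Spec_distribution_initial_run arr (distribution_initial_run arr)

-- ===== LEMMAS AND PROOFS =====

theorem pyMerge_perm (l r : List Int) : List.Perm (pyMerge l r) (l ++ r) := by
  induction l, r using pyMerge.induct with
  | case1 r => simp [pyMerge]
  | case2 l h => cases l <;> simp [pyMerge]
  | case3 x xs y ys hxy ih =>
    simp only [pyMerge, if_pos hxy, List.cons_append]
    exact (ih.cons x)
  | case4 x xs y ys hxy ih =>
    simp only [pyMerge, if_neg hxy]
    exact ((ih.cons y).trans List.perm_middle.symm)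

theorem pyMerge_sorted {l r : List Int} (hl : List.Pairwise (· ≤ ·) l)
    (hr : List.Pairwise (· ≤ ·) r) : List.Pairwise (· ≤ ·) (pyMerge l r) := by
  induction l, r using pyMerge.induct with
  | case1 r => simpa [pyMerge] using hr
  | case2 l h => cases l <;> simpa [pyMerge] using hl
  | case3 x xs y ys hxy ih =>
    simp only [pyMerge, if_pos hxy]
    rw [List.pairwise_cons]
    refine ⟨?_, ih hl.of_cons hr⟩
    intro b hb
    have hb' : b ∈ xs ++ y :: ys := (pyMerge_perm xs (y :: ys)).mem_iff.mp hb
    rcases List.mem_append.mp hb' with h1 | h1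
    · exact (List.pairwise_cons.mp hl).1 b h1
    · rcases List.mem_cons.mp h1 with rfl | h2
      · exact hxy
      · exact le_trans hxy ((List.pairwise_cons.mp hr).1 b h2)
  | case4 x xs y ys hxy ih =>
    simp only [pyMerge, if_neg hxy]
    rw [List.pairwise_cons]
    refine ⟨?_, ih hl hr.of_cons⟩
    intro b hb
    have hyx : y ≤ x := by omega
    have hb' : b ∈ (x :: xs) ++ ys := (pyMerge_perm (x :: xs) ys).mem_iff.mp hb
    rcases List.mem_append.mp hb' with h1 | h1
    · rcases List.mem_cons.mp h1 with rfl | h2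
      · exact hyx
      · exact le_trans hyx ((List.pairwise_cons.mp hl).1 b h2)
    · exact (List.pairwise_cons.mp hr).1 b h1

theorem altMerge_eq_pyMerge (l r : List Int) : altMerge l r = pyMerge l r := by
  induction l, r using altMerge.induct with
  | case1 r => cases r <;> simp [altMerge, pyMerge]
  | case2 l h => cases l <;> simp [altMerge, pyMerge]
  | case3 x xs y ys hxy ih => simp [altMerge, pyMerge, if_pos hxy, ih]
  | case4 x xs y ys hxy ih => simp [altMerge, pyMerge, if_neg hxy, ih]

theorem takeRun_append (prev : Int) (l : List Int) :
    (takeRun prev l).1 ++ (takeRun prev l).2 = l := by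
  induction l generalizing prev with
  | nil => simp [takeRun]
  | cons y ys ih =>
    simp only [takeRun]
    split
    · simpa using ih y
    · simp

theorem takeRun_pairwise (prev : Int) (l : List Int) :
    List.Pairwise (· ≤ ·) (prev :: (takeRun prev l).1) := by
  induction l generalizing prev with
  | nil => simp [takeRun]
  | cons y ys ih =>
    simp only [takeRun]
    split
    · rename_i hpy
      have h := ih y
      rw [List.pairwise_cons]
      refine ⟨?_, h⟩
      intro b hb
      rcases List.mem_cons.mp hb with rfl | h2
      · exact hpy
      · exact le_trans hpy ((List.pairwise_cons.mp h).1 b h2)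
    · simp

theorem initRuns_flatten (l : List Int) : (initRuns l).flatten = l := by
  induction l using initRuns.induct with
  | case1 => simp [initRuns]
  | case2 x xs ih =>
    simp only [initRuns, List.flatten_cons, List.cons_append, ih]
    rw [takeRun_append]

theorem initRuns_sorted (l : List Int) :
    ∀ r ∈ initRuns l, List.Pairwise (· ≤ ·) r := by
  induction l using initRuns.induct with
  | case1 => simp [initRuns]
  | case2 x xs ih =>
    intro r hr
    rw [initRuns] at hr
    rcases List.mem_cons.mp hr with rfl | h
    · exact takeRun_pairwise x xs
    · exact ih r h

theorem mergePass_flatten_perm (rs : List (List Int)) :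
    List.Perm (mergePass rs).flatten rs.flatten := by
  induction rs using mergePass.induct with
  | case1 => simp [mergePass]
  | case2 r => simp [mergePass]
  | case3 a b rest ih =>
    simp only [mergePass, List.flatten_cons]
    exact ((pyMerge_perm a b).append ih).trans (by rw [List.append_assoc])

theorem mergePass_sorted {rs : List (List Int)}
    (h : ∀ r ∈ rs, List.Pairwise (· ≤ ·) r) :
    ∀ r ∈ mergePass rs, List.Pairwise (· ≤ ·) r := by
  induction rs using mergePass.induct with
  | case1 => simp [mergePass]
  | case2 r => simpa [mergePass] using h
  | case3 a b rest ih =>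
    intro r hr
    rcases List.mem_cons.mp hr with rfl | h2
    · exact pyMerge_sorted (h a (by simp)) (h b (by simp))
    · exact ih (fun r hr => h r (by simp [hr])) r h2

theorem mergeLoop_flatten_perm (rs : List (List Int)) :
    List.Perm (mergeLoop rs).flatten rs.flatten := by
  induction rs using mergeLoop.induct with
  | case1 rs h ih =>
    rw [mergeLoop, dif_pos h]
    exact ih.trans (mergePass_flatten_perm rs)
  | case2 rs h =>
    rw [mergeLoop, dif_neg h]

theorem mergeLoop_sorted {rs : List (List Int)}
    (h : ∀ r ∈ rs, List.Pairwise (· ≤ ·) r) :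
    ∀ r ∈ mergeLoop rs, List.Pairwise (· ≤ ·) r := by
  induction rs using mergeLoop.induct with
  | case1 rs h1 ih =>
    rw [mergeLoop, dif_pos h1]
    exact ih (mergePass_sorted h)
  | case2 rs h1 =>
    rw [mergeLoop, dif_neg h1]
    exact h

theorem mergeLoop_length (rs : List (List Int)) : (mergeLoop rs).length ≤ 1 := by
  induction rs using mergeLoop.induct with
  | case1 rs h ih => rw [mergeLoop, dif_pos h]; exact ih
  | case2 rs h => rw [mergeLoop, dif_neg h]; omega

theorem A_sorted_perm (arr : List Int) :
    List.Pairwise (· ≤ ·) (distribution_initial_run arr) ∧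
      List.Perm (distribution_initial_run arr) arr := by
  unfold distribution_initial_run
  have hperm : List.Perm (mergeLoop (initRuns arr)).flatten arr := by
    simpa [initRuns_flatten] using mergeLoop_flatten_perm (initRuns arr)
  have hsort := mergeLoop_sorted (initRuns_sorted arr)
  have hlen := mergeLoop_length (initRuns arr)
  match hm : mergeLoop (initRuns arr) with
  | [] =>
    rw [hm] at hperm
    simp only [List.flatten_nil] at hperm
    exact ⟨List.Pairwise.nil, hperm⟩
  | r :: rest =>
    rw [hm] at hperm hsort hlen
    have : rest = [] := by
      cases rest with
      | nil => rfl
      | cons _ _ => simp at hlen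
    subst this
    simp only [List.flatten_cons, List.flatten_nil, List.append_nil] at hperm
    exact ⟨hsort r (by simp), hperm⟩

theorem B_sorted_perm (arr : List Int) :
    List.Pairwise (· ≤ ·) (distribution_initial_run_alt arr) ∧
      List.Perm (distribution_initial_run_alt arr) arr := by
  induction arr using distribution_initial_run_alt.induct with
  | case1 arr h =>
    rw [distribution_initial_run_alt, if_pos h]
    constructor
    · match arr, h with
      | [], _ => exact List.Pairwise.nil
      | [x], _ => exact List.pairwise_singleton _ x
    · exact List.Perm.refl arr
  | case2 arr h ih1 ih2 =>
    rw [distribution_initial_run_alt, if_neg h]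
    obtain ⟨s1, p1⟩ := ih1
    obtain ⟨s2, p2⟩ := ih2
    rw [altMerge_eq_pyMerge]
    refine ⟨pyMerge_sorted s1 s2, ?_⟩
    have h2 := (p1.append p2).trans (List.Perm.of_eq (List.take_append_drop _ _))
    exact (pyMerge_perm _ _).trans h2

-- ===== VERDICT (by name: the statement is the Claim_ definition above) =====
theorem distribution_initial_run_spec : Claim_equal_distribution_initial_run := by
  intro arr _
  unfold Spec_distribution_initial_run
  obtain ⟨sa, pa⟩ := A_sorted_perm arr
  obtain ⟨sb, pb⟩ := B_sorted_perm arr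
  exact List.Perm.eq_of_pairwise' sa sb (pa.trans pb.symm)
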